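-- pv_equiv track=rewrite | github.com/CodingThrust/problem-reductions | docs/paper/verify-reductions/adversary_register_sufficiency_sequencing_to_minimize_maximum_cumulative_cost.py | is_feasible_target
-- ===== SOURCE A (Python) =====
-- def is_feasible_target(costs, precedences, K, schedule):
--     """Check if schedule achieves max cumulative cost <= K."""
--     n = len(costs)
--     if len(schedule) != n or sorted(schedule) != list(range(n)):
--         return False, None
--
--     positions = {t: i for i, t in enumerate(schedule)}
--     for pred, succ in precedences:
--         if positions[pred] >= positions[succ]:
--             return False, None
--
--     cumulative = 0
--     max_cum = 0
--     for task in schedule: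
--         cumulative += costs[task]
--         if cumulative > max_cum:
--             max_cum = cumulative
--     return max_cum <= K, max_cum
-- ===== SOURCE B (Python) =====
-- def is_feasible_target(costs, precedences, K, schedule):
--     """Check if schedule achieves max cumulative cost <= K."""
--     n = len(costs)
--     if len(schedule) != n or sorted(schedule) != list(range(n)):
--         return False, None
--
--     preds = {}
--     for p, s in precedences:
--         preds.setdefault(s, []).append(p)
--
--     completed = set()
--     cumulative = 0
--     max_cum = 0
--     for task in schedule:
--         if any(p not in completed for p in preds.get(task, ())):
--             return False, None
--         completed.add(task)
--         cumulative += costs[task]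
--         if cumulative > max_cum:
--             max_cum = cumulative
--     return max_cum <= K, max_cum
-- ===== Notes on version B (the rewrite author's own statement) =====
-- stated objective: alternative
-- what changed: Replaces the positions-dict precedence pass with a single forward simulation over the schedule that keeps a completed-set and checks each task's predecessors (from a predecessor adjacency map) while accumulating the running cumulative maximum.
-- outside the precondition, e.g. on is_feasible_target([1, 2], [(1, 0), (5, 1)], 3, [0, 1]): A returns (False, None), B returns (False, None); on is_feasible_target([1, 2], [(5, 1)], 3, [0, 1]): A raises KeyError, B returns (False, None)
import Mathlib
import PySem

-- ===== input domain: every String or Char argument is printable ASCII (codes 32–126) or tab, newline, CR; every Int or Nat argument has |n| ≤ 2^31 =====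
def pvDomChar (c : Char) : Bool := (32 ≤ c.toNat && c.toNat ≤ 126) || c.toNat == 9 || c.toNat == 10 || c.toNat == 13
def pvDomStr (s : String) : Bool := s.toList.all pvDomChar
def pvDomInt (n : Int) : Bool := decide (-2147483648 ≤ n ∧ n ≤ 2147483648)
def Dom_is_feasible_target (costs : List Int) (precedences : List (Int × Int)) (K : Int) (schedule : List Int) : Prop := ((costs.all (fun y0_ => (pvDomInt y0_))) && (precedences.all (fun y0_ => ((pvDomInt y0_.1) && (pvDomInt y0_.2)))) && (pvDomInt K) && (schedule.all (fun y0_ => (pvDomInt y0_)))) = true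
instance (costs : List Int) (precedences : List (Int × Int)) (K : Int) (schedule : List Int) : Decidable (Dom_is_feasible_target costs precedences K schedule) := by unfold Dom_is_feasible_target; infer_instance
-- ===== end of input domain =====

-- B merges the precedence check into a single forward pass that maintains a completed-set
-- and a predecessor adjacency map, instead of A's separate positions-dict comparison pass
-- (objective: alternative decomposition, same cost).

-- ===== PORT A =====
-- A's precedence loop: return False,None on the first pair with positions[pred] >= positions[succ]
def pvCheckPrec (positions : PySem.Dict Int Int) : List (Int × Int) → Bool
  | [] => true
  | pr :: rest =>
      if positions.getD pr.1 0 ≥ positions.getD pr.2 0 then false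
      else pvCheckPrec positions rest

-- A's final loop: running cumulative and max_cum, then (max_cum <= K, max_cum)
def pvCostLoop (costs : List Int) (K : Int) : List Int → Int → Int → Bool × Option Int
  | [], _, max_cum => (decide (max_cum ≤ K), some max_cum)
  | task :: rest, cumulative, max_cum =>
      let c := cumulative + PySem.List.pyGetD costs task 0  -- costs[task]; in range: task ∈ permutation of range(len(costs))
      pvCostLoop costs K rest c (if c > max_cum then c else max_cum)

def is_feasible_target (costs : List Int) (precedences : List (Int × Int)) (K : Int) (schedule : List Int) : Bool × Option Int :=
  if schedule.length = costs.length ∧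
      PySem.List.sorted schedule (fun x => x) false = PySem.List.pyRange 0 costs.length 1 then
    let positions := (PySem.List.enumerate schedule 0).foldl (fun d p => d.insert p.2 p.1) PySem.Dict.empty
    if pvCheckPrec positions precedences then pvCostLoop costs K schedule 0 0
    else (false, none)
  else (false, none)

-- ===== PORT B =====
-- forward pass: predecessor check against the completed set, plus the cumulative max
def pvBLoop (costs : List Int) (K : Int) (predM : PySem.Dict Int (List Int)) :
    List Int → PySem.Set Int → Int → Int → Bool × Option Int
  | [], _, _, max_cum => (decide (max_cum ≤ K), some max_cum)
  | task :: rest, completed, cumulative, max_cum =>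
      if (predM.getD task []).any (fun p => !(PySem.Set.contains completed p)) then (false, none)
      else
        let c := cumulative + PySem.List.pyGetD costs task 0
        pvBLoop costs K predM rest (PySem.Set.add completed task) c (if c > max_cum then c else max_cum)

def is_feasible_target_alt (costs : List Int) (precedences : List (Int × Int)) (K : Int) (schedule : List Int) : Bool × Option Int :=
  if schedule.length = costs.length ∧
      PySem.List.sorted schedule (fun x => x) false = PySem.List.pyRange 0 costs.length 1 then
    let predM := precedences.foldl (fun d pr => d.modify pr.2 [] (· ++ [pr.1])) PySem.Dict.empty
    pvBLoop costs K predM schedule PySem.Set.empty 0 0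
  else (false, none)

-- ===== PRECONDITION & SPEC =====
-- Pre_ excludes inputs where the schedule is a valid permutation but some precedence pair
-- references a task outside it: there A's positions-dict lookup may raise KeyError.
def Pre_is_feasible_target (costs : List Int) (precedences : List (Int × Int)) (K : Int) (schedule : List Int) : Prop :=
  ¬ (schedule.length = costs.length ∧
      PySem.List.sorted schedule (fun x => x) false = PySem.List.pyRange 0 costs.length 1)
  ∨ ∀ pr ∈ precedences, pr.1 ∈ schedule ∧ pr.2 ∈ schedule
instance (costs : List Int) (precedences : List (Int × Int)) (K : Int) (schedule : List Int) : Decidable (Pre_is_feasible_target costs precedences K schedule) := by unfold Pre_is_feasible_target; infer_instance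

def pvWitness_is_feasible_target : List Int × (List (Int × Int)) × Int × List Int :=
  ([2, -1, 3], [(0, 1), (1, 2)], 4, [0, 1, 2])

def Spec_is_feasible_target (costs : List Int) (precedences : List (Int × Int)) (K : Int) (schedule : List Int) (out : Bool × Option Int) : Prop := out = is_feasible_target_alt costs precedences K schedule
instance (costs : List Int) (precedences : List (Int × Int)) (K : Int) (schedule : List Int) (out : Bool × Option Int) : Decidable (Spec_is_feasible_target costs precedences K schedule out) := by unfold Spec_is_feasible_target; infer_instance

-- ===== CLAIM (what is proved, stated in full; the proofs are below) =====
def Claim_equal_is_feasible_target : Prop := ∀ (costs : List Int) (precedences : List (Int × Int)) (K : Int) (schedule : List Int), Dom_is_feasible_target costs precedences K schedule → Pre_is_feasible_target costs precedences K schedule → Spec_is_feasible_target costs precedences K schedule (is_feasible_target costs precedences K schedule)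

-- ===== LEMMAS AND PROOFS =====

-- the positions dict of a duplicate-free list maps each member to its index
theorem pvPos_getD (xs : List Int) (s : Int) (d : PySem.Dict Int Int) (t : Int)
    (hnd : xs.Nodup) :
    ((PySem.List.enumerate xs s).foldl (fun d p => d.insert p.2 p.1) d).getD t 0 =
      if t ∈ xs then s + (xs.idxOf t : Int) else d.getD t 0 := by
  induction xs generalizing s d with
  | nil => simp [PySem.List.enumerate_nil]
  | cons x rest ih =>
    simp only [List.nodup_cons] at hnd
    rw [PySem.List.enumerate_cons]
    simp only [List.foldl_cons]
    rw [ih _ _ hnd.2]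
    by_cases hx : t = x
    · subst hx
      simp [hnd.1]
    · simp only [List.mem_cons, hx, false_or]
      by_cases hr : t ∈ rest
      · simp only [hr, if_true]
        rw [List.idxOf_cons_ne _ (by exact fun h => hx h.symm)]
        push_cast
        ring
      · simp [hr, PySem.Dict.getD_insert, hx]

-- predecessor map lookup = the list of predecessors of t, in order
theorem pvPredM_getD (l : List (Int × Int)) (t : Int) :
    (l.foldl (fun d pr => d.modify pr.2 [] (· ++ [pr.1])) PySem.Dict.empty).getD t [] =
      (l.filter (fun pr => pr.2 == t)).map (·.1) := by
  have h := PySem.Dict.getD_foldl_modify_append (l := l.map (fun pr => (pr.2, pr.1)))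
      (d := (PySem.Dict.empty : PySem.Dict Int (List Int))) (c := t)
  simp [List.foldl_map, List.filter_map] at h
  simpa [List.map_map, Function.comp] using h

-- the Bool "every task's predecessors precede it", pre = already scheduled prefix
def pvOkFrom (predM : PySem.Dict Int (List Int)) : List Int → List Int → Bool
  | _, [] => true
  | pre, t :: rest =>
      (predM.getD t []).all (fun p => decide (p ∈ pre)) && pvOkFrom predM (pre ++ [t]) rest

theorem pvBLoop_eq (costs : List Int) (K : Int) (predM : PySem.Dict Int (List Int))
    (suf pre : List Int) (c m : Int) :
    pvBLoop costs K predM suf (PySem.Set.ofList pre) c m =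
      if pvOkFrom predM pre suf then pvCostLoop costs K suf c m else (false, none) := by
  induction suf generalizing pre c m with
  | nil => simp [pvBLoop, pvOkFrom, pvCostLoop]
  | cons t rest ih =>
    have hcont : ∀ p : Int, PySem.Set.contains (PySem.Set.ofList pre) p = decide (p ∈ pre) := by
      intro p
      by_cases hp : p ∈ pre
      · simp [PySem.Set.mem_ofList, hp]
      · simp only [decide_eq_false hp]
        rw [← Bool.not_eq_true]
        simp [PySem.Set.mem_ofList, hp]
    have hany : ((predM.getD t []).any fun p => !(PySem.Set.contains (PySem.Set.ofList pre) p))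
        = !((predM.getD t []).all fun p => decide (p ∈ pre)) := by
      simp [List.any_eq_not_all_not]
    rw [pvBLoop, hany]
    by_cases hall : ((predM.getD t []).all fun p => decide (p ∈ pre)) = true
    · rw [hall]
      simp only [Bool.not_true]
      rw [← PySem.Set.ofList_append_singleton, ih]
      simp [pvOkFrom, hall, pvCostLoop]
    · rw [Bool.not_eq_true] at hall
      rw [hall]
      simp [pvOkFrom, hall]

theorem pvOkFrom_iff (predM : PySem.Dict Int (List Int)) (pre suf : List Int) :
    pvOkFrom predM pre suf = true ↔
      ∀ a t b, suf = a ++ t :: b → ∀ p ∈ predM.getD t [], p ∈ pre ++ a := by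
  induction suf generalizing pre with
  | nil =>
    simp only [pvOkFrom, true_iff]
    intro a t b h
    exact absurd h (by simp)
  | cons x rest ih =>
    rw [pvOkFrom, Bool.and_eq_true, List.all_eq_true, ih]
    constructor
    · rintro ⟨h1, h2⟩ a t b hdec p hp
      cases a with
      | nil =>
        simp only [List.nil_append, List.cons.injEq] at hdec
        obtain ⟨h1, h2⟩ := hdec
        subst h1
        simpa using h1 p hp
      | cons y a' =>
        simp only [List.cons_append, List.cons.injEq] at hdec
        obtain ⟨hd1, hd2⟩ := hdec
        subst hd1
        have := h2 a' t b hd2 p hp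
        simpa [List.append_assoc] using this
    · intro h
      refine ⟨fun p hp => by simpa using h [] x rest rfl p hp, ?_⟩
      intro a t b hdec p hp
      have := h (x :: a) t b (by simp [hdec]) p hp
      simpa [List.append_assoc] using this

theorem pvCheckPrec_iff (positions : PySem.Dict Int Int) (l : List (Int × Int)) :
    pvCheckPrec positions l = true ↔
      ∀ pr ∈ l, positions.getD pr.1 0 < positions.getD pr.2 0 := by
  induction l with
  | nil => simp [pvCheckPrec]
  | cons pr rest ih =>
    rw [pvCheckPrec]
    by_cases h : positions.getD pr.1 0 ≥ positions.getD pr.2 0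
    · simp only [h, if_true]
      constructor
      · intro hf; cases hf
      · intro hall
        exact absurd (hall pr (by simp)) (by omega)
    · simp only [h, if_false, ih]
      constructor
      · intro hall q hq
        rcases List.mem_cons.mp hq with rfl | hq'
        · omega
        · exact hall q hq'
      · intro hall q hq; exact hall q (List.mem_cons_of_mem _ hq)

theorem pvMem_take_iff_idxOf_lt (xs : List Int) (p : Int) (k : Nat) (hp : p ∈ xs) :
    p ∈ xs.take k ↔ xs.idxOf p < k := by
  induction xs generalizing k with
  | nil => cases hp
  | cons x rest ih =>
    cases k with
    | zero => simp
    | succ k' =>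
      by_cases hx : p = x
      · subst hx; simp [List.idxOf_cons_self]
      · rw [List.idxOf_cons_ne _ (by exact fun h => hx h.symm)]
        have hp' : p ∈ rest := by
          rcases List.mem_cons.mp hp with h | h
          · exact absurd h hx
          · exact h
        simp [List.take_succ_cons, hx, ih k' hp']

-- ===== VERDICT (by name: the statement is the Claim_ definition above) =====
theorem is_feasible_target_spec : Claim_equal_is_feasible_target := by
  intro costs precedences K schedule _hdom hpre
  unfold Spec_is_feasible_target is_feasible_target is_feasible_target_alt
  by_cases hperm : schedule.length = costs.length ∧
      PySem.List.sorted schedule (fun x => x) false = PySem.List.pyRange 0 costs.length 1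
  · simp only [hperm, and_self, if_true]
    -- schedule is duplicate-free (it is a permutation of range(n))
    have hnd : schedule.Nodup := by
      have hp : (PySem.List.sorted schedule (fun x => x) false).Perm schedule :=
        PySem.List.sorted_perm _ _ _
      rw [hperm.2] at hp
      exact hp.nodup (PySem.List.nodup_pyRange_one _ _)
    have hall : ∀ pr ∈ precedences, pr.1 ∈ schedule ∧ pr.2 ∈ schedule := by
      rcases hpre with h | h
      · exact absurd hperm h
      · exact h
    have hempty : (PySem.Set.empty : PySem.Set Int) = PySem.Set.ofList [] := rfl
    rw [hempty, pvBLoop_eq]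
    -- the two feasibility checks compute the same Bool
    have hkey : pvCheckPrec
        ((PySem.List.enumerate schedule 0).foldl (fun d p => d.insert p.2 p.1) PySem.Dict.empty)
        precedences
        = pvOkFrom (precedences.foldl (fun d pr => d.modify pr.2 [] (· ++ [pr.1]))
            PySem.Dict.empty) [] schedule := by
      rw [Bool.eq_iff_iff, pvCheckPrec_iff, pvOkFrom_iff]
      have hpos : ∀ t ∈ schedule,
          ((PySem.List.enumerate schedule 0).foldl (fun d p => d.insert p.2 p.1)
            PySem.Dict.empty).getD t 0 = (schedule.idxOf t : Int) := by
        intro t ht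
        rw [pvPos_getD _ _ _ _ hnd]
        simp [ht]
      have hpredm : ∀ t p : Int,
          p ∈ (precedences.foldl (fun d pr => d.modify pr.2 [] (· ++ [pr.1]))
            PySem.Dict.empty).getD t [] ↔ (p, t) ∈ precedences := by
        intro t p
        rw [pvPredM_getD]
        simp only [List.mem_map, List.mem_filter, beq_iff_eq]
        constructor
        · rintro ⟨pr, ⟨hpr, h2⟩, h1⟩
          have : pr = (p, t) := Prod.ext h1 h2
          rwa [this] at hpr
        · intro h
          exact ⟨(p, t), ⟨h, rfl⟩, rfl⟩
      constructor
      · -- A's pairwise position check implies B's forward-pass check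
        intro hA a t b hdec p hp
        rw [hpredm] at hp
        have hps : p ∈ schedule ∧ t ∈ schedule := hall (p, t) hp
        have hlt := hA (p, t) hp
        dsimp only at hlt
        rw [hpos _ hps.1, hpos _ hps.2] at hlt
        have hidxt : schedule.idxOf t ≤ a.length := by
          have ht1 : t ∈ schedule.take (a.length + 1) := by
            rw [hdec]
            simp [List.take_append]
          have := (pvMem_take_iff_idxOf_lt schedule t (a.length + 1)
            (by rw [hdec]; simp)).mp ht1
          omega
        have hpa : p ∈ schedule.take a.length :=
          (pvMem_take_iff_idxOf_lt schedule p a.length hps.1).mpr (by omega)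
        rw [hdec, List.take_left'] at hpa
        · simpa using hpa
        · rfl
      · -- B's forward-pass check implies A's pairwise position check
        intro hB pr hpr
        have hps := hall pr hpr
        have hi : schedule.idxOf pr.2 < schedule.length :=
          List.idxOf_lt_length_of_mem hps.2
        have hdec : schedule = schedule.take (schedule.idxOf pr.2) ++
            pr.2 :: schedule.drop (schedule.idxOf pr.2 + 1) := by
          conv_lhs => rw [← List.take_append_drop (schedule.idxOf pr.2) schedule,
            List.drop_eq_getElem_cons hi]
          rw [List.getElem_idxOf]
        have hp1 : pr.1 ∈ (precedences.foldl (fun d pr => d.modify pr.2 [] (· ++ [pr.1]))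
            PySem.Dict.empty).getD pr.2 [] := (hpredm pr.2 pr.1).mpr (by simpa using hpr)
        have := hB _ pr.2 _ hdec pr.1 hp1
        simp only [List.nil_append] at this
        have hlt := (pvMem_take_iff_idxOf_lt schedule pr.1 _ hps.1).mp this
        rw [hpos _ hps.1, hpos _ hps.2]
        exact_mod_cast hlt
    rw [hkey]
  · simp [hperm]
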